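-- pv_equiv track=rewrite | github.com/abdala13/telvedio | telegram_collector.py | _content
-- ===== SOURCE A (Python) =====
-- def _content(text: str) -> str:
--     lines = text.strip().split("\n")
--     out = []; found = False
--     for line in lines:
--         line = line.strip()
--         if not line: continue
--         if not found and len(line) > 3: found = True; continue
--         out.append(line)
--     return "\n\n".join(out) if out else text
-- ===== SOURCE B (Python) =====
-- def _content(text: str) -> str:
--     items = [l for l in (s.strip() for s in text.strip().split("\n")) if l]
--     idx = next((i for i, l in enumerate(items) if len(l) > 3), None)
--     out = items if idx is None else items[:idx] + items[idx + 1:]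
--     return "\n\n".join(out) if out else text
-- ===== Notes on version B (the rewrite author's own statement) =====
-- stated objective: alternative
-- what changed: Replaces the flag-threaded single accumulating loop by a two-phase locate-then-splice form: build the stripped non-empty lines, find the first index with length > 3, and drop it by list slicing.
import Mathlib
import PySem

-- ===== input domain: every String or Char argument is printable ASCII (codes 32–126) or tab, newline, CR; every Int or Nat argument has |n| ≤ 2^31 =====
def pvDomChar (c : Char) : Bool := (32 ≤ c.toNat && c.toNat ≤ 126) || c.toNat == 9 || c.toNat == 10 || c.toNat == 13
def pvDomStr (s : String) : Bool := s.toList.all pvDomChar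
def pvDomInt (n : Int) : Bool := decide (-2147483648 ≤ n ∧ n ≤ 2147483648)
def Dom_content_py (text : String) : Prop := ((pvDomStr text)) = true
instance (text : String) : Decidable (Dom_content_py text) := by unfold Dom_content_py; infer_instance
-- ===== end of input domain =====

-- B replaces A's flag-threaded accumulating loop by a locate-index-then-splice two-phase form (objective: alternative).

-- ===== PORT A =====
def content_py (text : String) : String :=
  let lines : List String := (PySem.Str.split? (PySem.Str.strip text) "\n").getD []
  let st : List String × Bool := lines.foldl (fun (st : List String × Bool) (line : String) =>
    let line := PySem.Str.strip line
    if line = "" then st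
    else if !st.2 && PySem.Str.len line > 3 then (st.1, true)
    else (st.1 ++ [line], st.2)) ([], false)
  if st.1 ≠ [] then PySem.Str.join "\n\n" st.1 else text

-- ===== PORT B =====
def content_py_alt (text : String) : String :=
  let items : List String := (((PySem.Str.split? (PySem.Str.strip text) "\n").getD []).map PySem.Str.strip).filter
    (fun l => l ≠ "")
  let out : List String := match items.findIdx? (fun l => PySem.Str.len l > 3) with
    | some i => items.take i ++ items.drop (i + 1)
    | none => items
  if out ≠ [] then PySem.Str.join "\n\n" out else text

-- ===== PRECONDITION & SPEC =====
def Spec_content_py (text : String) (out : String) : Prop := out = content_py_alt text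
instance (text : String) (out : String) : Decidable (Spec_content_py text out) := by unfold Spec_content_py; infer_instance

-- ===== CLAIM (what is proved, stated in full; the proofs are below) =====
def Claim_equal_content_py : Prop := ∀ (text : String), Dom_content_py text → Spec_content_py text (content_py text)

-- ===== LEMMAS AND PROOFS =====

-- A's core loop body on an already-stripped, non-empty item list
def pvStep (st : List String × Bool) (line : String) : List String × Bool :=
  if !st.2 && PySem.Str.len line > 3 then (st.1, true)
  else (st.1 ++ [line], st.2)

-- once found = true, the loop just appends everything
theorem pvStep_found (items : List String) (acc : List String) :
    items.foldl pvStep (acc, true) = (acc ++ items, true) := by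
  induction items generalizing acc with
  | nil => simp
  | cons h t ih => simp [pvStep, ih]

-- with found = false, the loop drops the first item of length > 3 (B's splice form)
theorem pvStep_notfound (items : List String) (acc : List String) :
    items.foldl pvStep (acc, false) =
      (match items.findIdx? (fun l => PySem.Str.len l > 3) with
        | some i => (acc ++ (items.take i ++ items.drop (i + 1)), true)
        | none => (acc ++ items, false)) := by
  induction items generalizing acc with
  | nil => simp
  | cons h t ih =>
    rw [List.foldl_cons, List.findIdx?_cons]
    by_cases hlen : 3 < h.length
    · rw [show pvStep (acc, false) h = (acc, true) from by
        simp [pvStep, PySem.Str.len_eq, hlen]]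
      rw [pvStep_found]
      simp [hlen]
    · rw [show pvStep (acc, false) h = (acc ++ [h], false) from by
        simp [pvStep, PySem.Str.len_eq, hlen]]
      rw [ih]
      cases hfi : t.findIdx? (fun l => decide (PySem.Str.len l > 3)) with
      | none => simp [hlen]
      | some i => simp [hlen]

-- ===== VERDICT (by name: the statement is the Claim_ definition above) =====
theorem content_py_spec : Claim_equal_content_py := by
  unfold Claim_equal_content_py Spec_content_py
  intro text _
  unfold content_py content_py_alt
  dsimp only
  rw [show (fun (st : List String × Bool) (line : String) =>
        let line := PySem.Str.strip line
        if line = "" then st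
        else if !st.2 && PySem.Str.len line > 3 then (st.1, true)
        else (st.1 ++ [line], st.2))
      = (fun st line => if (PySem.Str.strip line) ≠ "" then pvStep st (PySem.Str.strip line) else st)
      from by funext st line; by_cases h : PySem.Str.strip line = "" <;> simp [h, pvStep]]
  rw [← List.foldl_map (f := PySem.Str.strip)
      (g := fun (st : List String × Bool) (y : String) => if y ≠ "" then pvStep st y else st),
    PySem.List.foldl_ite_eq_foldl_filter]
  rw [pvStep_notfound]
  cases hfi : ((((PySem.Str.split? (PySem.Str.strip text) "\n").getD []).map PySem.Str.strip).filter
      (fun l => decide (l ≠ ""))).findIdx? (fun l => decide (PySem.Str.len l > 3)) with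
  | none => simp
  | some i => simp
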